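-- pv_equiv track=rewrite | github.com/tamireshc/python | restaurante-orders/src/analyze_log.py | which_days_joao_never_go_to_snake_bar
-- ===== SOURCE A (Python) =====
-- def which_days_joao_never_go_to_snake_bar(data):
--     available_days = set()
--     days_joao_go_to_snake_bar = set()
--
--     for item in data:
--         available_days.add(item[2])
--
--     for item in data:
--         if item[0] == "joao":
--             days_joao_go_to_snake_bar.add(item[2])
--     return available_days - days_joao_go_to_snake_bar
-- ===== SOURCE B (Python) =====
-- def which_days_joao_never_go_to_snake_bar(data):
--     visited = {}
--     for item in data:
--         visited[item[2]] = visited.get(item[2], False) or (item[0] == "joao")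
--     return {day for day, went in visited.items() if not went}
-- ===== Notes on version B (the rewrite author's own statement) =====
-- stated objective: alternative
-- what changed: Replaces A's two set-building passes plus a set-difference with a single pass maintaining one day->visited-flag dict, returning the days whose flag is False.
import Mathlib
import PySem

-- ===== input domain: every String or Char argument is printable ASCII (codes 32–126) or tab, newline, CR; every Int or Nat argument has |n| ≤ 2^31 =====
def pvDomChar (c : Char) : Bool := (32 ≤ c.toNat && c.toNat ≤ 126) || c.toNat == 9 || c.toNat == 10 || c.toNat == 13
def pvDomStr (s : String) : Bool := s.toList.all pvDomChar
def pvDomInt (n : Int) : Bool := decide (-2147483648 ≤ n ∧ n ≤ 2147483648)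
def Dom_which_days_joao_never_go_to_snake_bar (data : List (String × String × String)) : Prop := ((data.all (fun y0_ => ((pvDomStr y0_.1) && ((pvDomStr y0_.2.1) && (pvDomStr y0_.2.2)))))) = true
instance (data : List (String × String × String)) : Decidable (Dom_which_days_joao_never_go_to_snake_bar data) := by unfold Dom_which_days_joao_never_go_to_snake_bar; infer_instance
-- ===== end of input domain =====

-- B replaces A's two set-building passes and set difference with a single pass over one
-- day -> visited-flag dict; alternative decomposition, same O(n) cost.

-- ===== PORT A =====
def which_days_joao_never_go_to_snake_bar (data : List (String × String × String)) : List String :=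
  let available_days : PySem.Set String :=
    data.foldl (fun s item => PySem.Set.add s item.2.2) PySem.Set.empty
  let days_joao_go_to_snake_bar : PySem.Set String :=
    data.foldl (fun s item => if item.1 == "joao" then PySem.Set.add s item.2.2 else s) PySem.Set.empty
  PySem.Set.diff available_days days_joao_go_to_snake_bar

-- ===== PORT B =====
def which_days_joao_never_go_to_snake_bar_alt (data : List (String × String × String)) : List String :=
  let visited : PySem.Dict String Bool :=
    data.foldl (fun d item => d.insert item.2.2 (d.getD item.2.2 false || (item.1 == "joao")))
      PySem.Dict.empty
  visited.items.filterMap (fun kv => if kv.2 then none else some kv.1)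

-- ===== PRECONDITION & SPEC =====
def Spec_which_days_joao_never_go_to_snake_bar (data : List (String × String × String)) (out : List String) : Prop := out = which_days_joao_never_go_to_snake_bar_alt data
instance (data : List (String × String × String)) (out : List String) : Decidable (Spec_which_days_joao_never_go_to_snake_bar data out) := by unfold Spec_which_days_joao_never_go_to_snake_bar; infer_instance

-- ===== CLAIM (what is proved, stated in full; the proofs are below) =====
def Claim_equal_which_days_joao_never_go_to_snake_bar : Prop := ∀ (data : List (String × String × String)), Dom_which_days_joao_never_go_to_snake_bar data → Spec_which_days_joao_never_go_to_snake_bar data (which_days_joao_never_go_to_snake_bar data)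

-- ===== LEMMAS AND PROOFS =====

-- diff of a dict's key list equals filtering its items by the stored flags
lemma diff_items_base (l : List (String × Bool)) (sj : PySem.Set String)
    (hval : ∀ p ∈ l, p.2 = PySem.Set.contains sj p.1) :
    PySem.Set.diff (l.map Prod.fst) sj
      = l.filterMap (fun kv => if kv.2 then none else some kv.1) := by
  induction l with
  | nil => rfl
  | cons p rest ih =>
    obtain ⟨k, v⟩ := p
    have hp : v = PySem.Set.contains sj k := hval (k, v) (List.mem_cons_self ..)
    have ih' := ih (fun q hq => hval q (List.mem_cons_of_mem _ hq))
    show ((k :: rest.map Prod.fst).filter fun x => !(PySem.Set.contains sj x))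
       = List.filterMap (fun kv => if kv.2 then none else some kv.1) ((k, v) :: rest)
    rw [List.filter_cons, List.filterMap_cons, hp]
    cases hc : PySem.Set.contains sj k <;> simp_all [PySem.Set.diff]

lemma loop_eq (data : List (String × String × String)) (sa sj : PySem.Set String)
    (d : PySem.Dict String Bool)
    (hnd : sa.Nodup)
    (hkeys : d.keys = sa)
    (hval : ∀ p ∈ d.items, p.2 = PySem.Set.contains sj p.1)
    (hsub : ∀ x ∈ sj, x ∈ sa) :
    PySem.Set.diff (data.foldl (fun s item => PySem.Set.add s item.2.2) sa)
        (data.foldl (fun s item => if item.1 == "joao" then PySem.Set.add s item.2.2 else s) sj)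
      = (data.foldl
            (fun d item => d.insert item.2.2 (d.getD item.2.2 false || (item.1 == "joao"))) d).items.filterMap
          (fun kv => if kv.2 then none else some kv.1) := by
  induction data generalizing sa sj d with
  | nil =>
    simp only [List.foldl_nil]
    have hsa : sa = d.items.map Prod.fst := by rw [← hkeys]; rfl
    rw [hsa]
    exact diff_items_base _ _ hval
  | cons item rest ih =>
    simp only [List.foldl_cons]
    set c := item.2.2 with hc
    set a := item.1 with ha
    -- the flag stored so far for c agrees with membership in the joao set so far
    have hgetD : d.getD c false = PySem.Set.contains sj c := by
      cases hg : d.get? c with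
      | none =>
        have hnc : c ∉ sj := by
          intro hmem
          have hks : c ∈ d.keys := hkeys ▸ hsub c hmem
          rw [PySem.Dict.get?_eq_none_iff_not_mem_keys] at hg
          exact hg hks
        have h2 : PySem.Set.contains sj c = false := by
          rw [Bool.eq_false_iff]
          intro h
          exact hnc ((PySem.Set.contains_iff sj c).mp h)
        rw [PySem.Dict.getD_eq_get?_getD, hg, h2]
        rfl
      | some v =>
        rw [PySem.Dict.getD_eq_get?_getD, hg]
        exact hval (c, v) (PySem.Dict.mem_items_of_get?_eq_some d hg)
    apply ih
    · exact PySem.Set.nodup_add sa c hnd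
    · rw [← hkeys]
      by_cases hm : d.contains c = true
      · rw [PySem.Dict.keys_insert_of_contains d _ hm,
          PySem.Set.add_of_mem ((PySem.Dict.contains_iff_mem_keys d c).mp hm)]
      · have hm' : d.contains c = false := by
          cases h : d.contains c
          · rfl
          · exact absurd h hm
        rw [PySem.Dict.keys_insert_of_not_contains d _ hm',
          PySem.Set.add_of_not_mem (fun hmem => hm ((PySem.Dict.contains_iff_mem_keys d c).mpr hmem))]
    · intro p hp
      rcases (PySem.Dict.mem_items_insert d c _ p).mp hp with hpe | ⟨hpd, hne⟩
      · subst hpe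
        show (d.getD c false || (a == "joao"))
            = (if (a == "joao") = true then sj.add c else sj).contains c
        rw [hgetD]
        cases hj : (a == "joao") with
        | true =>
          rw [if_pos (by simp), Bool.or_true]
          have hmem : c ∈ sj.add c := (PySem.Set.mem_add sj c c).mpr (Or.inr rfl)
          exact ((PySem.Set.contains_iff (sj.add c) c).mpr hmem).symm
        | false =>
          rw [if_neg (by simp), Bool.or_false]
      · have hv := hval p hpd
        cases hj : (a == "joao") with
        | false =>
          rw [if_neg (by simp)]
          exact hv
        | true =>
          rw [if_pos (by simp), hv]
          by_cases hmm : p.1 ∈ sj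
          · rw [(PySem.Set.contains_iff sj p.1).mpr hmm,
              (PySem.Set.contains_iff (sj.add c) p.1).mpr ((PySem.Set.mem_add sj c p.1).mpr (Or.inl hmm))]
          · have h1 : PySem.Set.contains sj p.1 = false := by
              rw [Bool.eq_false_iff]
              intro h
              exact hmm ((PySem.Set.contains_iff sj p.1).mp h)
            have h2 : PySem.Set.contains (sj.add c) p.1 = false := by
              rw [Bool.eq_false_iff]
              intro h
              rcases (PySem.Set.mem_add sj c p.1).mp ((PySem.Set.contains_iff (sj.add c) p.1).mp h) with h' | h'
              · exact hmm h'
              · exact hne h'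
            rw [h1, h2]
    · intro x hx
      cases hj : (a == "joao") with
      | true =>
        rw [if_pos (by simp [hj])] at hx
        rcases (PySem.Set.mem_add sj c x).mp hx with h' | h'
        · exact (PySem.Set.mem_add sa c x).mpr (Or.inl (hsub x h'))
        · exact (PySem.Set.mem_add sa c x).mpr (Or.inr h')
      | false =>
        rw [if_neg (by simp [hj])] at hx
        exact (PySem.Set.mem_add sa c x).mpr (Or.inl (hsub x hx))

-- ===== VERDICT (by name: the statement is the Claim_ definition above) =====
theorem which_days_joao_never_go_to_snake_bar_spec : Claim_equal_which_days_joao_never_go_to_snake_bar := by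
  intro data _
  unfold Spec_which_days_joao_never_go_to_snake_bar
  unfold which_days_joao_never_go_to_snake_bar which_days_joao_never_go_to_snake_bar_alt
  exact loop_eq data _ _ _ List.nodup_nil rfl (by intro p hp; cases hp) (by intro x hx; cases hx)
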